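-- pv_equiv track=rewrite | github.com/sca075/Python-package-valetudo-map-parser | SCR/valetudo_map_parser/map_data.py | rrm_coordinates_to_valetudo
-- ===== SOURCE A (Python) =====
-- def rrm_coordinates_to_valetudo(points):
--     """Transform the coordinates from RRM to Valetudo."""
--     transformed_points = []
--     dimension_mm = 50 * 1024
--     for i, p in enumerate(points):
--         if i % 2 == 0:
--             transformed_points.append(round(p / 10))
--         else:
--             transformed_points.append(round((dimension_mm - p) / 10))
--     return transformed_points
-- ===== SOURCE B (Python) =====
-- def rrm_coordinates_to_valetudo(points):
--     """Pairwise decomposition: consume (x, y) pairs in one stride-2 sweep,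
--     then handle a possible trailing unpaired x; no per-element parity test."""
--     dimension_mm = 50 * 1024
--     out = []
--     i = 0
--     n = len(points)
--     while i + 1 < n:
--         out.append(round(points[i] / 10))
--         out.append(round((dimension_mm - points[i + 1]) / 10))
--         i += 2
--     if i < n:
--         out.append(round(points[i] / 10))
--     return out
-- ===== Notes on version B (the rewrite author's own statement) =====
-- stated objective: alternative
-- what changed: Replaces the single enumerate loop that branches on index parity with a stride-2 sweep consuming (x, y) pairs, each iteration emitting both transformed coordinates, plus an explicit unpaired-tail case.
import Mathlib
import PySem

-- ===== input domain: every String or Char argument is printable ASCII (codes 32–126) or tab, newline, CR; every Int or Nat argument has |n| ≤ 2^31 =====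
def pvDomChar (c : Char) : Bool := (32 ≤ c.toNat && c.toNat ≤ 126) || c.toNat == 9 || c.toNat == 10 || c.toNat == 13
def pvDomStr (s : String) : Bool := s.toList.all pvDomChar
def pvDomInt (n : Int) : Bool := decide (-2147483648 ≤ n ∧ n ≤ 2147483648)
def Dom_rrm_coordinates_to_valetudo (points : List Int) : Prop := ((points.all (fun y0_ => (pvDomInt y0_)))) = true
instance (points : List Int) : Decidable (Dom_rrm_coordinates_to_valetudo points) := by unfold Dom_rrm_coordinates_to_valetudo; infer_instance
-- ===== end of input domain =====

-- B replaces A's enumerate-and-parity-branch loop by one stride-2 sweep over (x, y)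
-- pairs plus an explicit unpaired tail (objective: alternative decomposition, same cost).

-- Shared numeric primitive: Python's round(p / 10) on an int p.  For |p| ≤ 2^31 + 51200
-- the float p/10 rounds exactly like the rational p/10 under half-even rounding
-- (ties p ≡ 5 (mod 10) give the exactly representable float p/10), so this integer
-- half-even rounding is exact on the stated domain.
def pvRound10 (p : Int) : Int :=
  let q := PySem.Int.floordiv p 10
  let r := p - 10 * q
  if r < 5 then q
  else if r > 5 then q + 1
  else if q % 2 = 0 then q else q + 1

-- ===== PORT A =====
-- for i, p in enumerate(points): append round(p/10) if i even else round((51200-p)/10)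
def rrm_coordinates_to_valetudo (points : List Int) : List Int :=
  let dimension_mm : Int := 50 * 1024
  (PySem.List.enumerate points 0).foldl
    (fun transformed_points ip =>
      if PySem.Int.mod ip.1 2 = 0 then
        transformed_points ++ [pvRound10 ip.2]
      else
        transformed_points ++ [pvRound10 (dimension_mm - ip.2)])
    []

-- ===== PORT B =====
-- the stride-2 while loop of Source B: each step reads points[i], points[i+1] and advances
-- i by 2, so it consumes the list two elements at a time; the 'if i < n' tail is the
-- one-element case.
def pvAltLoop (out : List Int) : List Int → List Int
  | x :: y :: rest => pvAltLoop (out ++ [pvRound10 x, pvRound10 (50 * 1024 - y)]) rest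
  | [x] => out ++ [pvRound10 x]
  | [] => out

def rrm_coordinates_to_valetudo_alt (points : List Int) : List Int :=
  pvAltLoop [] points

-- ===== PRECONDITION & SPEC =====
def Spec_rrm_coordinates_to_valetudo (points : List Int) (out : List Int) : Prop := out = rrm_coordinates_to_valetudo_alt points
instance (points : List Int) (out : List Int) : Decidable (Spec_rrm_coordinates_to_valetudo points out) := by unfold Spec_rrm_coordinates_to_valetudo; infer_instance

-- ===== CLAIM (what is proved, stated in full; the proofs are below) =====
def Claim_equal_rrm_coordinates_to_valetudo : Prop := ∀ (points : List Int), Dom_rrm_coordinates_to_valetudo points → Spec_rrm_coordinates_to_valetudo points (rrm_coordinates_to_valetudo points)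

-- ===== LEMMAS AND PROOFS =====

theorem pv_main : ∀ (points : List Int) (k : Nat) (acc : List Int),
    (PySem.List.enumerate points (2 * (k : Int))).foldl
      (fun transformed_points ip =>
        if PySem.Int.mod ip.1 2 = 0 then
          transformed_points ++ [pvRound10 ip.2]
        else
          transformed_points ++ [pvRound10 (50 * 1024 - ip.2)])
      acc = pvAltLoop acc points
  | [], _, acc => by simp [PySem.List.enumerate_nil, pvAltLoop]
  | [x], k, acc => by
    have h : PySem.Int.mod (2 * (k : Int)) 2 = 0 := by
      simp [PySem.Int.mod]
    simp [PySem.List.enumerate_cons, PySem.List.enumerate_nil, pvAltLoop]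
  | x :: y :: t, k, acc => by
    have h0 : PySem.Int.mod (2 * (k : Int)) 2 = 0 := by
      simp [PySem.Int.mod]
    have h1 : ¬ PySem.Int.mod (2 * (k : Int) + 1) 2 = 0 := by
      simp [PySem.Int.mod]
    have h2 : (2 * (k : Int) + 1 + 1) = 2 * ((k + 1 : Nat) : Int) := by push_cast; ring
    simp only [PySem.List.enumerate_cons, List.foldl_cons, h0, h1, if_pos, if_neg,
      not_false_iff, h2]
    have := pv_main t (k + 1) (acc ++ [pvRound10 x] ++ [pvRound10 (50 * 1024 - y)])
    simpa [pvAltLoop, List.append_assoc] using this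

-- ===== VERDICT (by name: the statement is the Claim_ definition above) =====
theorem rrm_coordinates_to_valetudo_spec : Claim_equal_rrm_coordinates_to_valetudo := by
  intro points _
  unfold Spec_rrm_coordinates_to_valetudo rrm_coordinates_to_valetudo rrm_coordinates_to_valetudo_alt
  simpa using pv_main points 0 []
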